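-- pv_equiv track=rewrite | github.com/danmaps/wordle-rainwater | rainwater.py | downfill
-- ===== SOURCE A (Python) =====
-- def fill_zeros(column, value):
--     if value in column:
--         first_index = column.index(value)
--         for i in range(first_index + 1, len(column)):
--             if column[i] == 0 and column[i-1] == value:
--                 column[i] = value
--     return column
--
-- def downfill(m):
--     filled_matrix = [row[:] for row in m]
--
--     for i in range(len(filled_matrix[0])):
--         column = [filled_matrix[j][i] for j in range(len(filled_matrix))]
--         column = fill_zeros(column, 1) # fill zeros below 1
--         column = fill_zeros(column, 2) # fill zeros below 2
--         for j in range(len(filled_matrix)):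
--             filled_matrix[j][i] = column[j] # update the matrix with the modified column
--
--     return filled_matrix
-- ===== SOURCE B (Python) =====
-- def downfill(m):
--     w = len(m[0])
--     prev = m[0][:]
--     out = [prev]
--     for row in m[1:]:
--         cur = [prev[i] if i < w and row[i] == 0 and prev[i] in (1, 2) else row[i]
--                for i in range(len(row))]
--         out.append(cur)
--         prev = cur
--     return out
-- ===== Notes on version B (the rewrite author's own statement) =====
-- stated objective: simpler
-- what changed: Replaces the per-column extraction + two value-specific fill_zeros passes + write-back with a single top-down row sweep that carries the previous filled row and copies a 1/2 down into each zero cell directly.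
import Mathlib
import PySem

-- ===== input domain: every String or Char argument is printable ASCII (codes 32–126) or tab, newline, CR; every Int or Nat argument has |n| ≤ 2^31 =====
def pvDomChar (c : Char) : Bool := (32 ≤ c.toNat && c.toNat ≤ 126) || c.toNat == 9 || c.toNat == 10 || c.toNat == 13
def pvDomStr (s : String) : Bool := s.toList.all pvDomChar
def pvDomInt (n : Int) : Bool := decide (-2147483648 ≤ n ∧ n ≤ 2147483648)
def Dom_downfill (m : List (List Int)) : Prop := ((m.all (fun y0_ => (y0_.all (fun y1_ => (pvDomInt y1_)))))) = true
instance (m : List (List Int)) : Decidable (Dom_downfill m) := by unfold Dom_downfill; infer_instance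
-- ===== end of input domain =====

-- B replaces A's per-column extraction + two value-specific fill_zeros passes + write-back
-- with one top-down sweep over the rows carrying the previous filled row (objective: simpler).

-- ===== PORT A =====
-- the 'for i in range(first_index + 1, len(column))' loop of fill_zeros; fuel = number of remaining indices
def fillLoop (value : Int) (column : List Int) (i : Nat) : Nat → List Int
  | 0 => column
  | fuel + 1 =>
    let column' := if column.getD i 0 = 0 ∧ column.getD (i - 1) 0 = value
                   then column.set i value else column
    fillLoop value column' (i + 1) fuel

def fillZeros (column : List Int) (value : Int) : List Int :=
  if value ∈ column then
    let first := column.idxOf value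
    fillLoop value column (first + 1) (column.length - (first + 1))
  else column

def downfill (m : List (List Int)) : List (List Int) :=
  let filled := m.map (fun row => row)   -- [row[:] for row in m]
  (List.range (filled.headD []).length).foldl (fun fm i =>
    let column := (List.range fm.length).map (fun j => (fm.getD j []).getD i 0)
    let column := fillZeros column 1
    let column := fillZeros column 2
    (List.range fm.length).foldl (fun fm2 j =>
      fm2.set j ((fm2.getD j []).set i (column.getD j 0))) fm) filled

-- ===== PORT B =====
def fillRow (w : Nat) (prev row : List Int) : List Int :=
  (List.range row.length).map (fun i =>
    if i < w ∧ row.getD i 0 = 0 ∧ (prev.getD i 0 = 1 ∨ prev.getD i 0 = 2)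
    then prev.getD i 0 else row.getD i 0)

def downfill_alt (m : List (List Int)) : List (List Int) :=
  match m with
  | [] => []    -- unreachable under Pre_downfill (Python raises IndexError on [])
  | r0 :: rest =>
    let w := r0.length
    (rest.foldl (fun (st : List (List Int) × List Int) row =>
      let cur := fillRow w st.2 row
      (st.1 ++ [cur], cur)) ([r0], r0)).1

-- ===== PRECONDITION & SPEC =====
-- Pre_ excludes the empty matrix and matrices with a row shorter than the first row:
-- there the Python A raises IndexError (m[0] on empty input, m[j][i] on a short row).
def Pre_downfill (m : List (List Int)) : Prop :=
  m ≠ [] ∧ ∀ row ∈ m, (m.headD []).length ≤ row.length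

instance (m : List (List Int)) : Decidable (Pre_downfill m) := by
  unfold Pre_downfill; infer_instance

def pvWitness_downfill : List (List Int) := [[1, 0, 3], [0, 2, 0], [0, 0, 0]]

def Spec_downfill (m : List (List Int)) (out : List (List Int)) : Prop := out = downfill_alt m
instance (m : List (List Int)) (out : List (List Int)) : Decidable (Spec_downfill m out) := by
  unfold Spec_downfill; infer_instance

-- ===== CLAIM (what is proved, stated in full; the proofs are below) =====
def Claim_equal_downfill : Prop :=
  ∀ (m : List (List Int)), Dom_downfill m → Pre_downfill m → Spec_downfill m (downfill m)

-- ===== LEMMAS AND PROOFS =====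

-- combined downward-carry step: a zero takes the value above when that value is 1 or 2
def dstep (p x : Int) : Int := if x = 0 ∧ (p = 1 ∨ p = 2) then p else x

def carryF (p : Int) : List Int → List Int
  | [] => []
  | x :: xs => dstep p x :: carryF (dstep p x) xs

-- single-value carry, matching one fill_zeros pass
def dstep1 (v p x : Int) : Int := if x = 0 ∧ p = v then v else x

def carry1 (v p : Int) : List Int → List Int
  | [] => []
  | x :: xs => dstep1 v p x :: carry1 v (dstep1 v p x) xs

theorem fillLoop_char (v : Int) : ∀ (fuel : Nat) (col : List Int) (i : Nat),
    1 ≤ i → fuel = col.length - i →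
    fillLoop v col i fuel = col.take i ++ carry1 v (col.getD (i - 1) 0) (col.drop i) := by
  intro fuel
  induction fuel with
  | zero =>
    intro col i _ hf
    have hle : col.length ≤ i := by omega
    simp [fillLoop, List.drop_eq_nil_of_le hle, List.take_of_length_le hle, carry1]
  | succ fuel ih =>
    intro col i hi hf
    have hlt : i < col.length := by omega
    have hy' : i - 1 < col.length := by omega
    set p := col.getD (i - 1) 0 with hp
    set y := dstep1 v p (col.getD i 0) with hy
    have hcol' : (if col.getD i 0 = 0 ∧ col.getD (i - 1) 0 = v then col.set i v else col)
        = col.set i y := by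
      by_cases h : col.getD i 0 = 0 ∧ col.getD (i - 1) 0 = v
      · rw [if_pos h]; congr 1
        rw [hy, dstep1, if_pos ⟨h.1, by rw [← hp] at h; exact h.2⟩]
      · rw [if_neg h]
        rw [hy, dstep1, if_neg (by rw [← hp] at h; exact h)]
        rw [List.getD_eq_getElem _ _ hlt, List.set_getElem_self]
    have hlen : (col.set i y).length = col.length := List.length_set
    have key := ih (col.set i y) (i + 1) (by omega) (by omega)
    rw [show fillLoop v col i (fuel + 1)
        = fillLoop v (col.set i y) (i + 1) fuel from by rw [fillLoop]; simp only [hcol'],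
      key]
    -- rewrite pieces
    have h1 : (col.set i y).take (i + 1) = col.take i ++ [y] := by
      rw [List.take_add_one, List.take_set, List.set_eq_of_length_le (by simp)]
      congr 1
      rw [List.getElem?_set]
      simp [hlt]
    have h2 : (col.set i y).drop (i + 1) = col.drop (i + 1) := by
      rw [List.drop_set]; simp
    have h3 : (col.set i y).getD (i + 1 - 1) 0 = y := by
      simp only [Nat.add_sub_cancel]
      rw [List.getD_eq_getElem _ _ (by omega), List.getElem_set_self]
    have h4 : col.drop i = col.getD i 0 :: col.drop (i + 1) := by
      rw [List.getD_eq_getElem _ _ hlt]; exact List.drop_eq_getElem_cons hlt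
    rw [h1, h2, h3, h4, carry1]
    simp only [List.append_assoc, List.singleton_append, ← hy]

theorem carry1_id (v p : Int) (l : List Int) (hp : p ≠ v) (hl : v ∉ l) :
    carry1 v p l = l := by
  induction l generalizing p with
  | nil => rfl
  | cons x xs ih =>
    simp only [List.mem_cons, not_or] at hl
    have hx : dstep1 v p x = x := by simp [dstep1]; intro _ h; exact absurd h hp
    simp [carry1, hx, ih x (fun h => hl.1 h.symm) hl.2]

theorem carry1_skip (v : Int) : ∀ (k : Nat) (l : List Int) (p : Int), p ≠ v →
    k ≤ l.length → (∀ j (h : j < l.length), j < k → l[j] ≠ v) →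
    carry1 v p l = l.take k ++ carry1 v (if k = 0 then p else l.getD (k - 1) 0) (l.drop k) := by
  intro k
  induction k with
  | zero => intro l p _ _ _; simp
  | succ k ih =>
    intro l p hp hk hno
    match l with
    | [] => simp at hk
    | x :: xs =>
      have hx : x ≠ v := hno 0 (by simp) (by omega)
      have hd : dstep1 v p x = x := by
        simp [dstep1]; intro _ h; exact absurd h hp
      have := ih xs x hx (by simpa using hk)
        (fun j h hj => by simpa using hno (j+1) (by simpa using h) (by omega))
      rw [carry1, hd, this]
      rcases Nat.eq_zero_or_pos k with h0 | h0
      · subst h0; simp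
      · simp only [List.take_succ_cons, List.drop_succ_cons, List.cons_append]
        congr 2
        rw [if_neg (by omega), if_neg (by omega), Nat.add_sub_cancel]
        rcases k with _ | k'
        · omega
        · simp

theorem fillZeros_char (col : List Int) (v : Int) :
    fillZeros col v = carry1 v (v + 1) col := by
  by_cases hv : v ∈ col
  · have hf : col.idxOf v < col.length := List.idxOf_lt_length_iff.mpr hv
    set first := col.idxOf v with hfi
    have hcolf : col.getD first 0 = v := by
      rw [List.getD_eq_getElem _ _ hf]; exact List.getElem_idxOf hf
    have hno : ∀ j (h : j < col.length), j < first → col[j] ≠ v := by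
      intro j h hj he
      have hjlt : j < (col.take first).length := by
        simp only [List.length_take]; omega
      have hmem : v ∈ col.take first := by
        rw [← he, show col[j] = (col.take first)[j] from (List.getElem_take (h:=hjlt)).symm]
        exact List.getElem_mem hjlt
      have := (List.mem_take_iff_idxOf_lt hv).mp hmem
      omega
    rw [fillZeros, if_pos hv, ← hfi,
      fillLoop_char v _ col (first + 1) (by omega) rfl,
      Nat.add_sub_cancel, hcolf]

    rw [carry1_skip v first col (v + 1) (by omega) (by omega) hno]
    have hdrop : col.drop first = v :: col.drop (first + 1) := by
      rw [← hcolf, List.getD_eq_getElem _ _ hf]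
      exact List.drop_eq_getElem_cons hf
    rw [hdrop, carry1]
    have hdv : ∀ q : Int, dstep1 v q v = v := by
      intro q; simp [dstep1]
    rw [hdv]
    have htake : col.take (first + 1) = col.take first ++ [v] := by
      rw [List.take_add_one]
      congr 1
      rw [(List.getElem?_eq_getElem hf : col[first]? = some col[first]), List.getElem_idxOf hf]
      rfl
    rw [htake]
    simp
  · rw [fillZeros, if_neg hv]
    exact (carry1_id v (v+1) col (by omega) hv).symm

theorem exchange (l : List Int) : ∀ (p r s : Int),
    ((p = 1) ↔ (s = 1)) → ((r = 2) ↔ (s = 2)) →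
    carry1 2 r (carry1 1 p l) = carryF s l := by
  induction l with
  | nil => intro p r s _ _; rfl
  | cons x xs ih =>
    intro p r s h1 h2
    have hz : dstep1 2 r (dstep1 1 p x) = dstep s x := by
      simp only [dstep1, dstep]
      split_ifs <;> omega
    simp only [carry1, carryF, hz]
    refine congrArg _ (ih (dstep1 1 p x) (dstep s x) (dstep s x) ?_ ?_) <;>
      · simp only [dstep1, dstep]
        try split_ifs
        all_goals omega

theorem column_char (col : List Int) :
    fillZeros (fillZeros col 1) 2 = carryF 0 col := by
  rw [fillZeros_char, fillZeros_char]
  exact exchange col 2 3 0 (by omega) (by omega)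

-- pointwise recurrence for carryF
theorem carryF_getD_succ : ∀ (l : List Int) (p : Int) (j : Nat), j + 1 < l.length →
    (carryF p l).getD (j + 1) 0 = dstep ((carryF p l).getD j 0) (l.getD (j + 1) 0) := by
  intro l
  induction l with
  | nil => intro p j h; simp at h
  | cons x xs ih =>
    intro p j h
    match j with
    | 0 =>
      match xs, h with
      | y :: ys, _ => simp [carryF]
    | j + 1 =>
      simp only [carryF, List.getD_cons_succ]
      exact ih (dstep p x) j (by simpa using h)

-- ===== A-side matrix characterisation =====

def colM (m : List (List Int)) (ii : Nat) : List Int :=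
  (List.range m.length).map (fun j => (m.getD j []).getD ii 0)

-- write-back fold lemmas
theorem wb_length (i : Nat) (c : List Int) : ∀ (k s : Nat) (fm : List (List Int)),
    ((List.range' s k).foldl (fun fm2 j => fm2.set j ((fm2.getD j []).set i (c.getD j 0))) fm).length
      = fm.length := by
  intro k
  induction k with
  | zero => intro s fm; rfl
  | succ k ih =>
    intro s fm
    rw [List.range'_succ, List.foldl_cons, ih]
    exact List.length_set

theorem wb_getD (i : Nat) (c : List Int) : ∀ (k s : Nat) (fm : List (List Int)) (j : Nat),
    j < fm.length →
    ((List.range' s k).foldl (fun fm2 j => fm2.set j ((fm2.getD j []).set i (c.getD j 0))) fm).getD j []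
      = if s ≤ j ∧ j < s + k then (fm.getD j []).set i (c.getD j 0) else fm.getD j [] := by
  intro k
  induction k with
  | zero => intro s fm j hj; simp
  | succ k ih =>
    intro s fm j hj
    rw [List.range'_succ, List.foldl_cons,
      ih (s + 1) _ j (by simpa using hj)]
    have hset : ∀ x : List Int, (fm.set s x).getD j []
        = if s = j then x else fm.getD j [] := by
      intro x
      by_cases h : s = j
      · subst h
        rw [if_pos rfl, List.getD_eq_getElem?_getD, List.getElem?_set, if_pos rfl,
          if_pos hj]
        rfl
      · rw [if_neg h, List.getD_eq_getElem?_getD, List.getElem?_set, if_neg h,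
          ← List.getD_eq_getElem?_getD]
    rw [hset]
    by_cases h : s = j
    · subst h
      split_ifs <;> first | rfl | omega
    · simp only [if_neg h]
      by_cases h2 : s + 1 ≤ j ∧ j < s + 1 + k
      · rw [if_pos h2, if_pos (by omega)]
      · rw [if_neg h2, if_neg (by omega)]

-- getD/set helpers
theorem getD_set_ne {α : Type} (d : α) (l : List α) {n ii : Nat} (h : n ≠ ii) (a : α) :
    (l.set n a).getD ii d = l.getD ii d := by
  rw [List.getD_eq_getElem?_getD, List.getElem?_set, if_neg h, ← List.getD_eq_getElem?_getD]

theorem getD_set_self {α : Type} (d : α) (l : List α) {n : Nat} (h : n < l.length) (a : α) :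
    (l.set n a).getD n d = a := by
  rw [List.getD_eq_getElem _ _ (by simpa using h), List.getElem_set_self]

theorem dstep_zero (x : Int) : dstep 0 x = x := by simp [dstep]

theorem carryF_getD_zero' (l : List Int) (p : Int) (h : l ≠ []) :
    (carryF p l).getD 0 0 = dstep p (l.getD 0 0) := by
  match l with
  | x :: xs => rfl

theorem colM_length (m : List (List Int)) (ii : Nat) : (colM m ii).length = m.length := by
  simp [colM]

theorem colM_getD (m : List (List Int)) (ii j : Nat) (hj : j < m.length) :
    (colM m ii).getD j 0 = (m.getD j []).getD ii 0 := by
  rw [List.getD_eq_getElem _ _ (by simpa [colM] using hj)]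
  simp [colM]

-- the body of A's loop over columns, named for the proofs
def colBody (i : Nat) (fm : List (List Int)) : List (List Int) :=
  let column := (List.range fm.length).map (fun j => (fm.getD j []).getD i 0)
  let column := fillZeros column 1
  let column := fillZeros column 2
  (List.range fm.length).foldl (fun fm2 j =>
    fm2.set j ((fm2.getD j []).set i (column.getD j 0))) fm

theorem downfill_eq_fold (m : List (List Int)) :
    downfill m = (List.range ((m.headD []).length)).foldl (fun fm i => colBody i fm) m := by
  simp [downfill, colBody]

-- invariant for A's fold over columns
theorem downfill_fold_char (m : List (List Int)) (w : Nat)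
    (hw : ∀ row ∈ m, w ≤ row.length) : ∀ (n : Nat), n ≤ w →
    (((List.range n).foldl (fun fm i => colBody i fm) m).length = m.length) ∧
    (∀ j, j < m.length →
      (((List.range n).foldl (fun fm i => colBody i fm) m).getD j []).length
        = (m.getD j []).length) ∧
    (∀ j ii, j < m.length →
      (((List.range n).foldl (fun fm i => colBody i fm) m).getD j []).getD ii 0 =
        if ii < n then (carryF 0 (colM m ii)).getD j 0 else (m.getD j []).getD ii 0) := by
  intro n
  induction n with
  | zero => intro _; simp
  | succ n ihn =>
    intro hn
    obtain ⟨hL, hRL, hE⟩ := ihn (by omega)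
    set R := (List.range n).foldl (fun fm i => colBody i fm) m with hR
    rw [List.range_succ, List.foldl_append, List.foldl_cons, List.foldl_nil, ← hR]
    have hrow : ∀ j, j < m.length → w ≤ (m.getD j []).length := by
      intro j hj
      rw [List.getD_eq_getElem _ _ hj]
      exact hw _ (List.getElem_mem hj)
    -- the extracted column equals colM m n
    have hc0 : (List.range R.length).map (fun j => (R.getD j []).getD n 0) = colM m n := by
      refine List.ext_getElem (by simp [hL, colM]) (fun j h1 h2 => ?_)
      have hj : j < m.length := by simpa [hL] using h1
      simp only [List.getElem_map, List.getElem_range, colM]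
      rw [hE j n hj, if_neg (by omega)]
    have hbody : colBody n R = (List.range R.length).foldl (fun fm2 j =>
        fm2.set j ((fm2.getD j []).set n ((carryF 0 (colM m n)).getD j 0))) R := by
      rw [colBody]
      simp only [hc0, column_char]
    rw [hbody, hL, List.range_eq_range']
    refine ⟨?_, ?_, ?_⟩
    · rw [wb_length n _ m.length 0 R]; exact hL
    · intro j hj
      rw [wb_getD n _ m.length 0 R j (by omega), if_pos (by omega), List.length_set]
      exact hRL j hj
    · intro j ii hj
      rw [wb_getD n _ m.length 0 R j (by omega), if_pos (by omega)]
      by_cases hii : ii = n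
      · subst hii
        rw [getD_set_self 0 _ (by have := hrow j hj; rw [hRL j hj]; omega)]
        rw [if_pos (by omega)]
      · rw [getD_set_ne 0 _ (fun h => hii h.symm)]
        rw [hE j ii hj]
        by_cases hlt : ii < n
        · rw [if_pos hlt, if_pos (by omega)]
        · rw [if_neg hlt, if_neg (by omega)]

-- ===== B-side characterisation =====

def specRows (w : Nat) : List Int → List (List Int) → List (List Int)
  | _, [] => []
  | prev, row :: rs =>
    let cur := fillRow w prev row
    cur :: specRows w cur rs

theorem alt_fold_char (w : Nat) : ∀ (rs : List (List Int)) (acc : List (List Int)) (prev : List Int),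
    (rs.foldl (fun (st : List (List Int) × List Int) row =>
      let cur := fillRow w st.2 row
      (st.1 ++ [cur], cur)) (acc, prev)).1 = acc ++ specRows w prev rs := by
  intro rs
  induction rs with
  | nil => intro acc prev; simp [specRows]
  | cons row rs ih =>
    intro acc prev
    rw [List.foldl_cons, ih, specRows]
    simp

theorem fillRow_length (w : Nat) (prev row : List Int) : (fillRow w prev row).length = row.length := by
  simp [fillRow]

theorem fillRow_getD (w : Nat) (prev row : List Int) (ii : Nat) :
    (fillRow w prev row).getD ii 0 =
      if ii < row.length then
        (if ii < w then dstep (prev.getD ii 0) (row.getD ii 0) else row.getD ii 0)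
      else 0 := by
  by_cases h : ii < row.length
  · have hlen : ii < ((List.range row.length).map (fun i =>
        if i < w ∧ row.getD i 0 = 0 ∧ (prev.getD i 0 = 1 ∨ prev.getD i 0 = 2)
        then prev.getD i 0 else row.getD i 0)).length := by simpa using h
    rw [fillRow, if_pos h, List.getD_eq_getElem _ _ hlen]
    simp only [List.getElem_map, List.getElem_range]
    by_cases hw : ii < w
    · rw [if_pos hw]
      simp only [dstep]
      split_ifs with h1 h2 h2 <;> first | rfl | (exfalso; tauto)
    · rw [if_neg hw, if_neg (by tauto)]
  · rw [fillRow, if_neg h]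
    exact List.getD_eq_default _ _ (by simpa using Nat.le_of_not_lt h)

theorem specRows_length (w : Nat) : ∀ (rs : List (List Int)) (prev : List Int),
    (specRows w prev rs).length = rs.length := by
  intro rs
  induction rs with
  | nil => intro _; rfl
  | cons row rs ih => intro prev; simp [specRows, ih]

theorem specRows_row_length (w : Nat) : ∀ (rs : List (List Int)) (prev : List Int) (j : Nat),
    j < rs.length → ((specRows w prev rs).getD j []).length = (rs.getD j []).length := by
  intro rs
  induction rs with
  | nil => intro prev j h; simp at h
  | cons row rs ih =>
    intro prev j h
    match j with
    | 0 => simpa [specRows] using fillRow_length w prev row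
    | j + 1 =>
      simp only [specRows, List.getD_cons_succ]
      exact ih _ j (by simpa using h)

theorem specRows_getD_succ (w : Nat) : ∀ (rs : List (List Int)) (prev : List Int) (j : Nat),
    j < rs.length →
    ((prev :: specRows w prev rs).getD (j + 1) []) =
      fillRow w ((prev :: specRows w prev rs).getD j []) (rs.getD j []) := by
  intro rs
  induction rs with
  | nil => intro prev j h; simp at h
  | cons row rs ih =>
    intro prev j h
    match j with
    | 0 => simp [specRows]
    | j + 1 =>
      simp only [specRows, List.getD_cons_succ]
      exact ih _ j (by simpa using h)

-- two lists with equal length and equal getD at every index are equal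
theorem eq_of_getD {α : Type} (d : α) (l1 l2 : List α) (hl : l1.length = l2.length)
    (h : ∀ j, l1.getD j d = l2.getD j d) : l1 = l2 := by
  refine List.ext_getElem hl (fun i h1 h2 => ?_)
  have := h i
  rwa [List.getD_eq_getElem _ _ h1, List.getD_eq_getElem _ _ h2] at this

theorem alt_char (r0 : List Int) (rest : List (List Int)) :
    downfill_alt (r0 :: rest) = r0 :: specRows r0.length r0 rest := by
  rw [downfill_alt, alt_fold_char]
  simp

theorem alt_entries (r0 : List Int) (rest : List (List Int)) (w : Nat)
    (hw : ∀ row ∈ (r0 :: rest), w ≤ row.length) :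
    ∀ j, j < (r0 :: rest).length → ∀ ii,
    ((r0 :: specRows w r0 rest).getD j []).getD ii 0 =
      if ii < w then (carryF 0 (colM (r0 :: rest) ii)).getD j 0
      else ((r0 :: rest).getD j []).getD ii 0 := by
  intro j
  induction j with
  | zero =>
    intro _ ii
    have h0 : (colM (r0 :: rest) ii).getD 0 0 = r0.getD ii 0 := by
      rw [colM_getD _ _ _ (by simp)]; rfl
    rw [carryF_getD_zero' _ _ (by
        intro h
        have := colM_length (r0 :: rest) ii
        rw [h] at this
        simp at this),
      h0, dstep_zero]
    simp
  | succ j ih =>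
    intro hj ii
    have hjr : j < rest.length := by simpa using hj
    have hjm : j < (r0 :: rest).length := by simp; omega
    rw [show ((r0 :: specRows w r0 rest).getD (j + 1) []) =
        fillRow w ((r0 :: specRows w r0 rest).getD j []) (rest.getD j []) from
      specRows_getD_succ w rest r0 j hjr]
    have hrowm : rest.getD j [] = (r0 :: rest).getD (j + 1) [] := rfl
    have hwrow : w ≤ (rest.getD j []).length := by
      rw [List.getD_eq_getElem _ _ hjr]
      exact hw _ (by simp [List.getElem_mem hjr])
    rw [fillRow_getD]
    by_cases hii : ii < w
    · rw [if_pos (by omega), if_pos hii, if_pos hii, ih hjm ii, if_pos hii,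
        carryF_getD_succ _ 0 j (by rw [colM_length]; simpa using hj),
        colM_getD _ _ _ (by simpa using hj)]
      rfl
    · rw [if_neg hii, if_neg hii]
      by_cases hlen : ii < (rest.getD j []).length
      · rw [if_pos hlen]
        rfl
      · rw [if_neg hlen, ← hrowm, List.getD_eq_default _ _ (by omega)]

-- ===== VERDICT (by name: the statement is the Claim_ definition above) =====
theorem downfill_spec : Claim_equal_downfill := by
  intro m _ hpre
  unfold Spec_downfill
  obtain ⟨hne, hrows⟩ := hpre
  match m with
  | r0 :: rest =>
    set m := r0 :: rest with hm
    set w := r0.length with hwdef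
    have hw : ∀ row ∈ m, w ≤ row.length := by simpa using hrows
    have hhead : (m.headD []).length = w := rfl
    obtain ⟨haL, haRL, haE⟩ := downfill_fold_char m w hw w le_rfl
    rw [downfill_eq_fold, hhead, hm, alt_char, ← hm]
    set A := (List.range w).foldl (fun fm i => colBody i fm) m with hA
    set B := r0 :: specRows w r0 rest with hB
    have hbL : B.length = m.length := by
      rw [hB, hm]
      simp [specRows_length]
    have hbRL : ∀ j, j < m.length → (B.getD j []).length = (m.getD j []).length := by
      intro j hj
      match j with
      | 0 => rfl
      | j + 1 => exact specRows_row_length w rest r0 j (by rw [hm] at hj; simpa using hj)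
    have hbE := alt_entries r0 rest w hw
    refine eq_of_getD [] A B (by rw [haL, hbL]) (fun j => ?_)
    by_cases hj : j < m.length
    · refine eq_of_getD 0 _ _ (by rw [haRL j hj, hbRL j hj]) (fun ii => ?_)
      rw [haE j ii hj, hbE j (by rw [← hm]; exact hj) ii]
    · rw [List.getD_eq_default _ _ (by omega), List.getD_eq_default _ _ (by omega)]
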